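-- pv_equiv track=rewrite | github.com/Prajanya-g/bach-gpt | src/bpe.py | unapply_bpe
-- ===== SOURCE A (Python) =====
-- from typing import Dict, Iterable, List, Optional, Sequence, Tuple
--
-- Merge = Tuple[int, int, int]
--
-- def unapply_bpe(ids: Sequence[int], merges: Sequence[Merge]) -> List[int]:
--     """Expand merged ids back to base. Walks merges in reverse order."""
--     expand: Dict[int, Tuple[int, int]] = {m[2]: (m[0], m[1]) for m in merges}
--     if not expand:
--         return list(ids)
--
--     out = list(ids)
--     changed = True
--     while changed:
--         changed = False
--         new_out: List[int] = []
--         for tid in out: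
--             if tid in expand:
--                 a, b = expand[tid]
--                 new_out.append(a)
--                 new_out.append(b)
--                 changed = True
--             else:
--                 new_out.append(tid)
--         out = new_out
--     return out
-- ===== SOURCE B (Python) =====
-- from typing import Dict, List, Sequence, Tuple
--
-- Merge = Tuple[int, int, int]
--
-- def unapply_bpe(ids: Sequence[int], merges: Sequence[Merge]) -> List[int]:
--     """Expand merged ids back to base: one pass over ids, each id fully
--     expanded by an explicit-stack DFS emitting base tokens directly."""
--     expand: Dict[int, Tuple[int, int]] = {m[2]: (m[0], m[1]) for m in merges}
--     out: List[int] = []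
--     for tid in ids:
--         stack = [tid]
--         while stack:
--             t = stack.pop()
--             pair = expand.get(t)
--             if pair is None:
--                 out.append(t)
--             else:
--                 stack.append(pair[1])
--                 stack.append(pair[0])
--     return out
-- ===== Notes on version B (the rewrite author's own statement) =====
-- stated objective: faster
-- what changed: Replaces A's repeated whole-sequence rewrite passes (rewrite the full token list once per merge level until a fixpoint) with a single pass over ids that fully expands each id via an explicit-stack DFS, emitting base tokens directly; Pre_ excludes only inputs where A never returns: a merge entry with fewer than 3 elements (A raises IndexError building the dict) or a cycle in the merge-expansion graph reachable from ids (A's while-loop runs forever).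
import Mathlib
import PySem

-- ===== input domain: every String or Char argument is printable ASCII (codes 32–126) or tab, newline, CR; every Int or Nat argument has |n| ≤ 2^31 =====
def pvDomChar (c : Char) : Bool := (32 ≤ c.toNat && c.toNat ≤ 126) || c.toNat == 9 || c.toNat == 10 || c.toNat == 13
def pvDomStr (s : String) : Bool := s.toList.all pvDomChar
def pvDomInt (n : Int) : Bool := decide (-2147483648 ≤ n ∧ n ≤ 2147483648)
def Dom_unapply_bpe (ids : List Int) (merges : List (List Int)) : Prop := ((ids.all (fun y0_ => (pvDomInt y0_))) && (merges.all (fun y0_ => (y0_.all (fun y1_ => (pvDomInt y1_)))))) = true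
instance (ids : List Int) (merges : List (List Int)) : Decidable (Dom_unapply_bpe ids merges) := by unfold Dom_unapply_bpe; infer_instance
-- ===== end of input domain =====

-- B replaces A's repeated whole-sequence rewrite passes by a single pass over `ids`
-- that fully expands each id with an explicit-stack DFS, emitting base tokens directly.

-- shared by both ports: the dict comprehension {m[2]: (m[0], m[1]) for m in merges}
-- (pyGetD totalizes m[0]/m[1]/m[2]; Pre_ guarantees every merge has ≥ 3 entries, where Python would raise IndexError)
def mkExpand (merges : List (List Int)) : PySem.Dict Int (Int × Int) :=
  merges.foldl
    (fun d m =>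
      d.insert (PySem.List.pyGetD m 2 0) (PySem.List.pyGetD m 0 0, PySem.List.pyGetD m 1 0))
    PySem.Dict.empty

-- ===== PORT A =====
-- one pass of A's while-loop body: for tid in out: … building (new_out, changed)
def passA (d : PySem.Dict Int (Int × Int)) (out : List Int) : List Int × Bool :=
  out.foldl
    (fun st tid =>
      match d.get? tid with
      | some (a, b) => (st.1 ++ [a, b], true)
      | none        => (st.1 ++ [tid], st.2))
    ([], false)

-- A's `while changed` loop; the fuel argument only totalizes it (outside Pre_ the Python loop can run forever)
def loopA (d : PySem.Dict Int (Int × Int)) : Nat → List Int → List Int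
  | 0, out => out
  | f + 1, out =>
      let r := passA d out
      if r.2 then loopA d f r.1 else r.1

def unapply_bpe (ids : List Int) (merges : List (List Int)) : List Int :=
  let expand := mkExpand merges
  if expand.size = 0 then ids
  else loopA expand (merges.length + 2) ids

-- ===== PORT B =====
-- B's inner `while stack:` loop; fuel only totalizes it (outside Pre_ the Python loop can run forever)
def expandStack (d : PySem.Dict Int (Int × Int)) : Nat → List Int → List Int → List Int
  | 0, stack, out => out ++ stack
  | _ + 1, [], out => out
  | f + 1, t :: rest, out =>
      match d.get? t with
      | some (a, b) => expandStack d f (a :: b :: rest) out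
      | none        => expandStack d f rest (out ++ [t])

def unapply_bpe_alt (ids : List Int) (merges : List (List Int)) : List Int :=
  let expand := mkExpand merges
  ids.foldl (fun out tid => expandStack expand (2 ^ (merges.length + 2)) [tid] out) []

-- ===== PRECONDITION & SPEC =====
-- the key and the two parts of a merge entry (last entry wins, as in the dict comprehension)
def kOf (m : List Int) : Int := PySem.List.pyGetD m 2 0
def vOf (m : List Int) : Int × Int := (PySem.List.pyGetD m 0 0, PySem.List.pyGetD m 1 0)

-- children of a token in the merge-expansion graph: the two parts of the last merge producing it
def childs (merges : List (List Int)) (t : Int) : List Int :=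
  match merges.reverse.find? (fun m => kOf m == t) with
  | some m => [(vOf m).1, (vOf m).2]
  | none => []

-- one saturation step and the bounded reachability closure of the merge-expansion graph
def stepR (merges : List (List Int)) (T : List Int) : List Int :=
  (T ++ T.flatMap (childs merges)).dedup

def reachL (merges : List (List Int)) (n : Nat) (S : List Int) : List Int :=
  (stepR merges)^[n] S

-- enough closure iterations to saturate: |S| + (number of distinct tokens the graph can add) + slack
def NR (ids : List Int) (merges : List (List Int)) : Nat :=
  ids.length + 2 * merges.length + 4

-- Pre_ excludes exactly the inputs on which A never returns: a merge entry with fewer than 3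
-- elements (A raises IndexError building the dict comprehension) or a cycle in the
-- merge-expansion graph reachable from ids (A's `while changed` loop rewrites forever).
def Pre_unapply_bpe (ids : List Int) (merges : List (List Int)) : Prop :=
  (∀ m ∈ merges, 3 ≤ m.length) ∧
  ∀ k ∈ reachL merges (NR ids merges) ids,
    k ∉ reachL merges (NR ids merges) (childs merges k)
instance (ids : List Int) (merges : List (List Int)) : Decidable (Pre_unapply_bpe ids merges) := by
  unfold Pre_unapply_bpe; infer_instance

def pvWitness_unapply_bpe : List Int × List (List Int) := ([9, 5, 0], [[3, 4, 5], [5, 1, 9]])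

def Spec_unapply_bpe (ids : List Int) (merges : List (List Int)) (out : List Int) : Prop := out = unapply_bpe_alt ids merges
instance (ids : List Int) (merges : List (List Int)) (out : List Int) : Decidable (Spec_unapply_bpe ids merges out) := by unfold Spec_unapply_bpe; infer_instance

-- ===== CLAIM (what is proved, stated in full; the proofs are below) =====
def Claim_equal_unapply_bpe : Prop := ∀ (ids : List Int) (merges : List (List Int)), Dom_unapply_bpe ids merges → Pre_unapply_bpe ids merges → Spec_unapply_bpe ids merges (unapply_bpe ids merges)

-- ===== LEMMAS AND PROOFS =====

theorem get?_mkExpand (merges : List (List Int)) (x : Int) :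
    (mkExpand merges).get? x = ((merges.reverse.find? (fun m => kOf m == x)).map vOf) := by
  have key : ∀ (l : List (List Int)) (d : PySem.Dict Int (Int × Int)),
      (l.foldl (fun d m => d.insert (kOf m) (vOf m)) d).get? x
        = ((l.reverse.find? (fun m => kOf m == x)).map vOf).or (d.get? x) := by
    intro l
    induction l with
    | nil => intro d; simp
    | cons m rest ih =>
        intro d
        rw [List.foldl_cons, ih, List.reverse_cons, List.find?_append, Option.map_or,
          Option.or_assoc]
        congr 1
        by_cases hm : kOf m = x
        · simp [List.find?, hm, Option.or]
        · have : (kOf m == x) = false := by simpa using hm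
          simp [List.find?, this, PySem.Dict.get?_insert, Ne.symm hm]
  have := key merges PySem.Dict.empty
  simpa [mkExpand, kOf, vOf] using this

-- childs agrees with the dict both ports build
theorem childs_eq_of_get (merges : List (List Int)) {t a b : Int}
    (h : (mkExpand merges).get? t = some (a, b)) : childs merges t = [a, b] := by
  rw [get?_mkExpand] at h
  unfold childs
  cases hf : merges.reverse.find? (fun m => kOf m == t) with
  | none => rw [hf] at h; simp at h
  | some m =>
      rw [hf] at h
      simp only [Option.map_some, Option.some.injEq] at h
      simp [h]

-- ---------- bounded closure theory ----------

theorem mem_stepR_iff (merges : List (List Int)) (T : List Int) (x : Int) :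
    x ∈ stepR merges T ↔ x ∈ T ∨ ∃ y ∈ T, x ∈ childs merges y := by
  simp [stepR, List.mem_dedup, List.mem_append, List.mem_flatMap]

theorem reachL_succ (merges : List (List Int)) (n : Nat) (S : List Int) :
    reachL merges (n + 1) S = stepR merges (reachL merges n S) := by
  unfold reachL; rw [Function.iterate_succ_apply']

theorem subset_reachL (merges : List (List Int)) (n : Nat) (S : List Int) :
    S ⊆ reachL merges n S := by
  induction n with
  | zero => simp [reachL]
  | succ n ih =>
      rw [reachL_succ]
      exact fun x hx => (mem_stepR_iff _ _ _).2 (Or.inl (ih hx))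

theorem reachL_mono (merges : List (List Int)) (S : List Int) {m n : Nat} (h : m ≤ n) :
    reachL merges m S ⊆ reachL merges n S := by
  induction n with
  | zero => have : m = 0 := by omega
            subst this; exact fun x hx => hx
  | succ n ih =>
      by_cases hm : m = n + 1
      · subst hm; exact fun x hx => hx
      · intro x hx
        rw [reachL_succ]
        exact (mem_stepR_iff _ _ _).2 (Or.inl (ih (by omega) hx))

def allParts (merges : List (List Int)) : List Int :=
  merges.flatMap (fun m => [(vOf m).1, (vOf m).2])

theorem childs_subset_allParts (merges : List (List Int)) (t : Int) :
    childs merges t ⊆ allParts merges := by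
  unfold childs
  cases hf : merges.reverse.find? (fun m => kOf m == t) with
  | none => simp
  | some m =>
      have hm : m ∈ merges := by
        have := List.mem_of_find?_eq_some hf
        simpa using this
      intro c hc
      simp only [List.mem_cons, List.not_mem_nil, or_false] at hc
      simp only [allParts, List.mem_flatMap]
      exact ⟨m, hm, by rcases hc with rfl | rfl <;> simp⟩

theorem length_allParts (merges : List (List Int)) :
    (allParts merges).length = 2 * merges.length := by
  induction merges with
  | nil => simp [allParts]
  | cons m l ih =>
      simp only [allParts, List.flatMap_cons, List.length_append] at *
      simp [ih]; omega

theorem reachL_subset_univ (merges : List (List Int)) (n : Nat) (S : List Int) :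
    reachL merges n S ⊆ S ++ allParts merges := by
  induction n with
  | zero => simp [reachL]
  | succ n ih =>
      intro x hx
      rw [reachL_succ] at hx
      rcases (mem_stepR_iff _ _ _).1 hx with hx | ⟨y, _, hc⟩
      · exact ih hx
      · exact List.mem_append_right _ (childs_subset_allParts merges y hc)

theorem nodup_reachL (merges : List (List Int)) (n : Nat) (S : List Int) :
    (reachL merges (n + 1) S).Nodup := by
  rw [reachL_succ]; exact List.nodup_dedup _

theorem nodup_subset_length {T L : List Int} (h : T.Nodup) (hs : T ⊆ L) :
    T.length ≤ L.length := by
  calc T.length = T.toFinset.card := (List.toFinset_card_of_nodup h).symm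
    _ ≤ L.toFinset.card := Finset.card_le_card (fun a ha => by
        rw [List.mem_toFinset] at *; exact hs ha)
    _ ≤ L.length := List.toFinset_card_le L

theorem nodup_strict_length {T T' : List Int} (hT : T.Nodup) (hT' : T'.Nodup)
    (hs : T ⊆ T') {c : Int} (hc : c ∈ T') (hnc : c ∉ T) : T.length < T'.length := by
  have hss : T.toFinset ⊂ T'.toFinset := by
    constructor
    · intro a ha; rw [List.mem_toFinset] at *; exact hs ha
    · intro h
      exact hnc (by
        have := h (List.mem_toFinset.2 hc)
        exact List.mem_toFinset.1 this)
  calc T.length = T.toFinset.card := (List.toFinset_card_of_nodup hT).symm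
    _ < T'.toFinset.card := Finset.card_lt_card hss
    _ = T'.length := List.toFinset_card_of_nodup hT'

def Closed (merges : List (List Int)) (T : List Int) : Prop :=
  ∀ x ∈ T, ∀ c ∈ childs merges x, c ∈ T

theorem exists_closed (merges : List (List Int)) (S : List Int) :
    ∃ n, n ≤ S.length + 2 * merges.length + 2 ∧ Closed merges (reachL merges n S) := by
  by_contra h
  push_neg at h
  set U := S.length + 2 * merges.length with hU
  have bound : ∀ m : Nat, (reachL merges (m + 1) S).length ≤ U := by
    intro m
    have := nodup_subset_length (nodup_reachL merges m S) (reachL_subset_univ merges (m + 1) S)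
    rw [List.length_append, length_allParts] at this
    omega
  have key : ∀ k : Nat, k ≤ U + 1 → k ≤ (reachL merges (k + 1) S).length := by
    intro k
    induction k with
    | zero => intro _; exact Nat.zero_le _
    | succ k ih =>
        intro hk
        have h1 := ih (by omega)
        have hnc := h (k + 1) (by omega)
        unfold Closed at hnc
        push_neg at hnc
        obtain ⟨x, hx, c, hc, hcn⟩ := hnc
        have hcmem : c ∈ reachL merges (k + 2) S := by
          rw [reachL_succ]
          exact (mem_stepR_iff _ _ _).2 (Or.inr ⟨x, hx, hc⟩)
        have hsub : reachL merges (k + 1) S ⊆ reachL merges (k + 2) S :=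
          reachL_mono merges S (by omega)
        have := nodup_strict_length (nodup_reachL merges k S) (nodup_reachL merges (k + 1) S)
          hsub hcmem hcn
        omega
  have h1 := key (U + 1) (by omega)
  have h2 := bound (U + 1)
  omega

-- true (unbounded) reachability in the merge-expansion graph
def reaches (merges : List (List Int)) : Int → Int → Prop :=
  Relation.ReflTransGen (fun x y => y ∈ childs merges x)

theorem closed_reach (merges : List (List Int)) {T : List Int} (hT : Closed merges T)
    {S : List Int} (hS : S ⊆ T) {s x : Int} (h : reaches merges s x) (hs : s ∈ S) :
    x ∈ T := by
  induction h with
  | refl => exact hS hs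
  | tail _ h2 ih => exact hT _ ih _ h2

theorem reach_complete (merges : List (List Int)) {S : List Int} {s x : Int}
    (hs : s ∈ S) (h : reaches merges s x) {N : Nat}
    (hN : S.length + 2 * merges.length + 2 ≤ N) : x ∈ reachL merges N S := by
  obtain ⟨n, hn, hcl⟩ := exists_closed merges S
  exact reachL_mono merges S (by omega)
    (closed_reach merges hcl (subset_reachL merges n S) h hs)

-- ---------- the rank used to measure expansion depth ----------

-- number of merge entries whose key t can reach (classical; proof-side only)
noncomputable def rho (merges : List (List Int)) (t : Int) : Nat :=
  merges.countP (fun m => @decide (reaches merges t (kOf m)) (Classical.propDecidable _))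

theorem rho_le (merges : List (List Int)) (t : Int) : rho merges t ≤ merges.length :=
  List.countP_le_length

theorem countP_strict {α : Type} (l : List α) (p q : α → Bool)
    (hpq : ∀ x ∈ l, p x = true → q x = true) :
    ∀ x ∈ l, q x = true → p x = false → l.countP p < l.countP q := by
  induction l with
  | nil => intro x hx; simp at hx
  | cons a l ih =>
      intro x hx hqx hpx
      have hmono : l.countP p ≤ l.countP q :=
        List.countP_mono_left (fun y hy => hpq y (List.mem_cons_of_mem _ hy))
      rcases List.mem_cons.1 hx with rfl | hx'
      · rw [List.countP_cons, List.countP_cons, hpx, hqx]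
        simpa using Nat.lt_succ_of_le hmono
      · have hlt := ih (fun y hy => hpq y (List.mem_cons_of_mem _ hy)) x hx' hqx hpx
        rw [List.countP_cons, List.countP_cons]
        have ha := hpq a List.mem_cons_self
        by_cases hpa : p a = true
        · rw [hpa, ha hpa]; omega
        · rw [Bool.not_eq_true] at hpa
          rw [hpa]; cases q a <;> simp <;> omega

theorem rho_lt (merges : List (List Int)) {t a b c : Int}
    (hget : (mkExpand merges).get? t = some (a, b)) (hc : c = a ∨ c = b)
    (hnr : ¬ reaches merges c t) : rho merges c < rho merges t := by
  have hch := childs_eq_of_get merges hget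
  have hrel : c ∈ childs merges t := by rw [hch]; rcases hc with rfl | rfl <;> simp
  -- the merge entry defining t
  rw [get?_mkExpand] at hget
  obtain ⟨mt, hf, _⟩ : ∃ mt, merges.reverse.find? (fun m => kOf m == t) = some mt ∧
      vOf mt = (a, b) := by
    cases hf : merges.reverse.find? (fun m => kOf m == t) with
    | none => rw [hf] at hget; simp at hget
    | some mt => rw [hf] at hget; exact ⟨mt, rfl, by simpa using hget⟩
  have hkt : kOf mt = t := by
    have := List.find?_some hf
    simpa using this
  have hmem : mt ∈ merges := by
    have := List.mem_of_find?_eq_some hf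
    simpa using this
  unfold rho
  apply countP_strict merges _ _ ?mono mt hmem ?qw ?pw
  case mono =>
    intro m _ hp
    simp only [decide_eq_true_eq] at hp ⊢
    exact Relation.ReflTransGen.head hrel hp
  case qw =>
    simp only [decide_eq_true_eq, hkt]
    exact Relation.ReflTransGen.refl
  case pw =>
    simp only [decide_eq_false_iff_not, hkt]
    exact hnr

-- ---------- relativized expansion machinery ----------

-- d is expandable on the set R along the measure ρ
def ExpandableOn (d : PySem.Dict Int (Int × Int)) (ρ : Int → Nat) (R : Int → Prop) : Prop :=
  (∀ t a b, R t → d.get? t = some (a, b) → R a ∧ R b) ∧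
  (∀ t a b, R t → d.get? t = some (a, b) → ∀ c, (c = a ∨ c = b) → ρ c < ρ t)

-- well-founded rank of a token: 0 for base tokens, measure + 1 for merged ones
def rank (d : PySem.Dict Int (Int × Int)) (ρ : Int → Nat) (t : Int) : Nat :=
  if (d.get? t).isSome then ρ t + 1 else 0

theorem rank_lt_of_get (d : PySem.Dict Int (Int × Int)) {ρ : Int → Nat} {R : Int → Prop}
    (hm : ExpandableOn d ρ R) {t a b : Int} (hR : R t) (hget : d.get? t = some (a, b)) :
    rank d ρ a < rank d ρ t ∧ rank d ρ b < rank d ρ t := by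
  have ht : rank d ρ t = ρ t + 1 := by simp [rank, hget]
  have main : ∀ c, (c = a ∨ c = b) → rank d ρ c < rank d ρ t := by
    intro c hcab
    by_cases hc : (d.get? c).isSome
    · have := hm.2 t a b hR hget c hcab
      rw [ht]; simp only [rank, hc, if_true]; omega
    · rw [ht]; simp [rank, hc]
  exact ⟨main a (Or.inl rfl), main b (Or.inr rfl)⟩

theorem rank_le_bound (d : PySem.Dict Int (Int × Int)) {ρ : Int → Nat} {B : Nat}
    (hb : ∀ t, ρ t ≤ B) (t : Int) : rank d ρ t ≤ B + 1 := by
  have := hb t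
  unfold rank; split <;> omega

-- the fully expanded form, computed with a depth budget
def fullE (d : PySem.Dict Int (Int × Int)) : Nat → Int → List Int
  | 0, t => [t]
  | n + 1, t =>
      match d.get? t with
      | none => [t]
      | some (a, b) => fullE d n a ++ fullE d n b

theorem fullE_nonkey (d : PySem.Dict Int (Int × Int)) {t : Int}
    (h : d.get? t = none) : ∀ n, fullE d n t = [t] := by
  intro n; cases n <;> simp [fullE, h]

theorem fullE_succ_key (d : PySem.Dict Int (Int × Int)) {t a b : Int}
    (hget : d.get? t = some (a, b)) (n : Nat) :
    fullE d (n + 1) t = fullE d n a ++ fullE d n b := by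
  simp [fullE, hget]

theorem fullE_stable (d : PySem.Dict Int (Int × Int)) {ρ : Int → Nat} {R : Int → Prop}
    (hm : ExpandableOn d ρ R) :
    ∀ n m t, R t → rank d ρ t ≤ n → rank d ρ t ≤ m → fullE d n t = fullE d m t := by
  intro n
  induction n with
  | zero =>
      intro m t _ hn _
      have h0 : rank d ρ t = 0 := by omega
      have hnone : d.get? t = none := by
        unfold rank at h0
        by_cases h : (d.get? t).isSome
        · simp [h] at h0
        · simpa using h
      rw [fullE_nonkey d hnone, fullE_nonkey d hnone]
  | succ n ih =>
      intro m t hR hn hm'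
      cases hget : d.get? t with
      | none => rw [fullE_nonkey d hget, fullE_nonkey d hget]
      | some p =>
          obtain ⟨a, b⟩ := p
          have hr : rank d ρ t = ρ t + 1 := by simp [rank, hget]
          obtain ⟨m', rfl⟩ : ∃ m', m = m' + 1 := ⟨m - 1, by omega⟩
          have hlt := rank_lt_of_get d hm hR hget
          obtain ⟨hRa, hRb⟩ := hm.1 t a b hR hget
          rw [fullE_succ_key d hget, fullE_succ_key d hget,
            ih m' a hRa (by omega) (by omega), ih m' b hRb (by omega) (by omega)]

theorem F_key (d : PySem.Dict Int (Int × Int)) {ρ : Int → Nat} {R : Int → Prop}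
    (hm : ExpandableOn d ρ R) {N : Nat} (hN : ∀ t, rank d ρ t ≤ N) {t a b : Int}
    (hR : R t) (hget : d.get? t = some (a, b)) :
    fullE d N t = fullE d N a ++ fullE d N b := by
  have hlt := rank_lt_of_get d hm hR hget
  have hrt : 1 ≤ rank d ρ t := by simp [rank, hget]
  obtain ⟨hRa, hRb⟩ := hm.1 t a b hR hget
  obtain ⟨N', rfl⟩ : ∃ N', N = N' + 1 := ⟨N - 1, by have := hN t; omega⟩
  rw [fullE_succ_key d hget,
      fullE_stable d hm N' (N' + 1) a hRa (by have := hN t; omega) (hN a),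
      fullE_stable d hm N' (N' + 1) b hRb (by have := hN t; omega) (hN b)]

theorem fullE_length_le (d : PySem.Dict Int (Int × Int)) :
    ∀ n t, (fullE d n t).length ≤ 2 ^ n := by
  intro n
  induction n with
  | zero => intro t; simp [fullE]
  | succ n ih =>
      intro t
      cases hget : d.get? t with
      | none => simp [fullE, hget]; exact Nat.one_le_two_pow
      | some p =>
          obtain ⟨a, b⟩ := p
          simp only [fullE, hget, List.length_append, pow_succ]
          have := ih a; have := ih b; omega

theorem fullE_length_pos (d : PySem.Dict Int (Int × Int)) :
    ∀ n t, 1 ≤ (fullE d n t).length := by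
  intro n
  induction n with
  | zero => intro t; simp [fullE]
  | succ n ih =>
      intro t
      cases hget : d.get? t with
      | none => simp [fullE, hget]
      | some p =>
          obtain ⟨a, b⟩ := p
          simp only [fullE, hget, List.length_append]
          have := ih a; omega

theorem flatMap_singleton_of {α : Type} (g : α → List α) :
    ∀ l : List α, (∀ x ∈ l, g x = [x]) → l.flatMap g = l := by
  intro l
  induction l with
  | nil => simp
  | cons x l ih =>
      intro h
      simp only [List.flatMap_cons, h x List.mem_cons_self,
        ih (fun y hy => h y (List.mem_cons_of_mem _ hy)), List.singleton_append]

-- one-token rewrite done by each pass of A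
def step1 (d : PySem.Dict Int (Int × Int)) (t : Int) : List Int :=
  match d.get? t with
  | some (a, b) => [a, b]
  | none => [t]

theorem passA_spec (d : PySem.Dict Int (Int × Int)) (out : List Int) :
    passA d out = (out.flatMap (step1 d), out.any (fun t => (d.get? t).isSome)) := by
  unfold passA
  have key : ∀ (l : List Int) (acc : List Int) (c : Bool),
      l.foldl (fun st tid =>
        match d.get? tid with
        | some (a, b) => (st.1 ++ [a, b], true)
        | none        => (st.1 ++ [tid], st.2)) (acc, c)
      = (acc ++ l.flatMap (step1 d), c || l.any (fun t => (d.get? t).isSome)) := by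
    intro l
    induction l with
    | nil => simp
    | cons t l ih =>
        intro acc c
        cases hget : d.get? t with
        | none => simp [List.foldl_cons, hget, ih, step1]
        | some p =>
            obtain ⟨a, b⟩ := p
            simp [List.foldl_cons, hget, ih, step1]
  simpa using key out [] false

theorem loopA_spec (d : PySem.Dict Int (Int × Int)) {ρ : Int → Nat} {R : Int → Prop}
    (hm : ExpandableOn d ρ R) {N : Nat} (hN : ∀ t, rank d ρ t ≤ N) :
    ∀ (fuel : Nat) (out : List Int), (∀ t ∈ out, R t) → (∀ t ∈ out, rank d ρ t < fuel) →
      loopA d fuel out = out.flatMap (fullE d N) := by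
  intro fuel
  induction fuel with
  | zero => intro out _ h; cases out with
      | nil => simp [loopA]
      | cons t l => exact absurd (h t List.mem_cons_self) (by omega)
  | succ f ih =>
      intro out hRout h
      rw [loopA, passA_spec]
      by_cases hch : out.any (fun t => (d.get? t).isSome) = true
      · simp only [hch, if_true]
        have hfpos : 1 ≤ f := by
          obtain ⟨t0, ht0, hk0⟩ := List.any_eq_true.1 hch
          have h1 := h t0 ht0
          have h2 : 1 ≤ rank d ρ t0 := by simp [rank, hk0]
          omega
        have hmemnext : ∀ x ∈ out.flatMap (step1 d), R x ∧ rank d ρ x < f := by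
          intro x hx
          simp only [List.mem_flatMap] at hx
          obtain ⟨t, ht, hxt⟩ := hx
          have hrt := h t ht
          have hRt := hRout t ht
          unfold step1 at hxt
          cases hget : d.get? t with
          | none =>
              rw [hget] at hxt; simp at hxt; subst hxt
              have : rank d ρ x = 0 := by simp [rank, hget]
              exact ⟨hRt, by omega⟩
          | some p =>
              obtain ⟨a, b⟩ := p
              rw [hget] at hxt
              have hlt := rank_lt_of_get d hm hRt hget
              have hRab := hm.1 t a b hRt hget
              simp at hxt
              rcases hxt with rfl | rfl
              · exact ⟨hRab.1, by omega⟩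
              · exact ⟨hRab.2, by omega⟩
        rw [ih _ (fun x hx => (hmemnext x hx).1) (fun x hx => (hmemnext x hx).2),
          List.flatMap_assoc]
        apply List.flatMap_congr
        intro x hx
        cases hget : d.get? x with
        | none => simp [step1, hget, fullE_nonkey d hget]
        | some p =>
            obtain ⟨a, b⟩ := p
            simp [step1, hget, F_key d hm hN (hRout x hx) hget]
      · simp only [hch]
        have hall : ∀ t ∈ out, d.get? t = none := by
          intro t ht
          by_contra hne
          exact hch (List.any_eq_true.2 ⟨t, ht, by simpa [Option.isSome_iff_ne_none] using hne⟩)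
        rw [flatMap_singleton_of _ out (fun t ht => by simp [step1, hall t ht])]
        exact (flatMap_singleton_of _ out (fun t ht => fullE_nonkey d (hall t ht) N)).symm

-- B side: loop-iteration budget of expanding one token
def wk (d : PySem.Dict Int (Int × Int)) (N : Nat) (t : Int) : Nat :=
  2 * (fullE d N t).length - 1

def sumWork (d : PySem.Dict Int (Int × Int)) (N : Nat) (stack : List Int) : Nat :=
  (stack.map (wk d N)).sum

theorem expandStack_spec (d : PySem.Dict Int (Int × Int)) {ρ : Int → Nat} {R : Int → Prop}
    (hm : ExpandableOn d ρ R) {N : Nat} (hN : ∀ t, rank d ρ t ≤ N) :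
    ∀ (fuel : Nat) (stack out : List Int), (∀ t ∈ stack, R t) → sumWork d N stack ≤ fuel →
      expandStack d fuel stack out = out ++ stack.flatMap (fullE d N) := by
  intro fuel
  induction fuel with
  | zero =>
      intro stack out _ h
      cases stack with
      | nil => simp [expandStack]
      | cons t l =>
          exfalso
          have hpos : 1 ≤ wk d N t := by
            have := fullE_length_pos d N t
            unfold wk; omega
          simp [sumWork] at h; omega
  | succ f ih =>
      intro stack out hRs h
      cases stack with
      | nil => simp [expandStack]
      | cons t rest =>
          have hRt := hRs t List.mem_cons_self
          have hRrest : ∀ x ∈ rest, R x := fun x hx => hRs x (List.mem_cons_of_mem _ hx)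
          cases hget : d.get? t with
          | none =>
              rw [expandStack]
              simp only [hget]
              have hwt : wk d N t = 1 := by
                simp [wk, fullE_nonkey d hget]
              rw [ih rest (out ++ [t]) hRrest (by simp [sumWork, hwt] at h ⊢; omega)]
              simp [fullE_nonkey d hget]
          | some p =>
              obtain ⟨a, b⟩ := p
              rw [expandStack]
              simp only [hget]
              have hF := F_key d hm hN hRt hget
              have hRab := hm.1 t a b hRt hget
              have hwa : 1 ≤ (fullE d N a).length := fullE_length_pos d _ a
              have hwb : 1 ≤ (fullE d N b).length := fullE_length_pos d _ b
              have hw : wk d N t = wk d N a + wk d N b + 1 := by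
                unfold wk; rw [hF]; simp [List.length_append]; omega
              rw [ih (a :: b :: rest) out
                (by intro x hx
                    simp only [List.mem_cons] at hx
                    rcases hx with rfl | rfl | hx
                    · exact hRab.1
                    · exact hRab.2
                    · exact hRrest x hx)
                (by simp [sumWork, hw] at h ⊢; omega)]
              simp [hF]

theorem wk_le (d : PySem.Dict Int (Int × Int)) (N : Nat) (t : Int) :
    wk d N t ≤ 2 ^ (N + 1) := by
  have h1 := fullE_length_le d N t
  have : (2:Nat) ^ (N + 1) = 2 * 2 ^ N := by ring
  unfold wk; omega

theorem alt_foldl_spec (d : PySem.Dict Int (Int × Int)) {ρ : Int → Nat} {R : Int → Prop}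
    (hm : ExpandableOn d ρ R) {N : Nat} (hN : ∀ t, rank d ρ t ≤ N) :
    ∀ (ids acc : List Int), (∀ t ∈ ids, R t) →
      ids.foldl (fun out tid => expandStack d (2 ^ (N + 1)) [tid] out) acc
        = acc ++ ids.flatMap (fullE d N) := by
  intro ids
  induction ids with
  | nil => simp
  | cons t rest ih =>
      intro acc hR
      rw [List.foldl_cons,
        expandStack_spec d hm hN _ [t] acc
          (by intro x hx
              simp only [List.mem_singleton] at hx
              exact hx ▸ hR t List.mem_cons_self)
          (by simpa [sumWork] using wk_le d N t),
        ih _ (fun x hx => hR x (List.mem_cons_of_mem _ hx))]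
      simp

theorem empty_get_none (d : PySem.Dict Int (Int × Int)) (h : d.size = 0) (t : Int) :
    d.get? t = none := by
  apply (PySem.Dict.get?_eq_none_iff_not_mem_keys _ _).2
  intro hmem
  have : d.keys.length = 0 := by
    simpa [PySem.Dict.keys, PySem.Dict.size] using h
  rw [List.length_eq_zero_iff.1 this] at hmem
  simp at hmem

-- ===== VERDICT (by name: the statement is the Claim_ definition above) =====
theorem unapply_bpe_spec : Claim_equal_unapply_bpe := by
  intro ids merges _hdom hpre
  unfold Spec_unapply_bpe unapply_bpe unapply_bpe_alt
  set d := mkExpand merges with hd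
  -- the set of tokens reachable from ids, and the measure
  set R : Int → Prop := fun t => ∃ s ∈ ids, reaches merges s t with hR
  have hRids : ∀ t ∈ ids, R t := fun t ht => ⟨t, ht, Relation.ReflTransGen.refl⟩
  have hcl : ∀ t a b, R t → d.get? t = some (a, b) → R a ∧ R b := by
    intro t a b ⟨s, hs, hreach⟩ hget
    have hch := childs_eq_of_get merges hget
    constructor
    · exact ⟨s, hs, Relation.ReflTransGen.tail hreach (by rw [hch]; simp)⟩
    · exact ⟨s, hs, Relation.ReflTransGen.tail hreach (by rw [hch]; simp)⟩
  have hexp : ∀ t a b, R t → d.get? t = some (a, b) → ∀ c, (c = a ∨ c = b) →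
      rho merges c < rho merges t := by
    intro t a b hRt hget c hc
    apply rho_lt merges hget hc
    intro hreach
    obtain ⟨s, hs, hst⟩ := hRt
    have ht_in : t ∈ reachL merges (NR ids merges) ids :=
      reach_complete merges hs hst (by unfold NR; omega)
    have hc_in : t ∈ reachL merges (NR ids merges) (childs merges t) := by
      apply reach_complete merges (S := childs merges t) ?_ hreach ?_
      · rw [childs_eq_of_get merges hget]; rcases hc with rfl | rfl <;> simp
      · rw [childs_eq_of_get merges hget]; unfold NR; simp; omega
    exact hpre.2 t ht_in hc_in
  have hm : ExpandableOn d (rho merges) R := ⟨hcl, hexp⟩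
  have hN : ∀ t, rank d (rho merges) t ≤ merges.length + 1 :=
    rank_le_bound d (rho_le merges)
  have halt : ids.foldl (fun out tid => expandStack d (2 ^ (merges.length + 2)) [tid] out) []
      = ids.flatMap (fullE d (merges.length + 1)) := by
    rw [show (2 : Nat) ^ (merges.length + 2) = 2 ^ ((merges.length + 1) + 1) from rfl,
      alt_foldl_spec d hm hN ids [] hRids, List.nil_append]
  rw [halt]
  by_cases hsz : d.size = 0
  · simp only [hsz, if_true]
    exact (flatMap_singleton_of _ ids (fun t _ => fullE_nonkey d (empty_get_none d hsz t) _)).symm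
  · simp only [hsz, if_false]
    exact loopA_spec d hm hN _ ids hRids (fun t _ => by have := hN t; omega)
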